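-- pv_equiv track=rewrite | github.com/arnobt78/VRPTW-Solver-Comparison-pyApp | aco/solve.py | get_best_route_from_path
-- ===== SOURCE A (Python) =====
-- def get_best_route_from_path(best_path):
--     if not best_path:
--         return []
--     routes = []
--     route = []
--     for node in best_path:
--         if node != 0:
--             route.append(node)
--         else:
--             if route:
--                 routes.append(route)
--                 route = []
--     return routes
-- ===== SOURCE B (Python) =====
-- def get_best_route_from_path(best_path):
--     routes = []
--     rest = best_path
--     while 0 in rest:
--         i = rest.index(0)
--         if i > 0:
--             routes.append(rest[:i])
--         rest = rest[i + 1:]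
--     return routes
-- ===== Notes on version B (the rewrite author's own statement) =====
-- stated objective: alternative
-- what changed: Replaced the per-element accumulator scan (appending nodes to a pending route, flushing on zeros) with a while loop that repeatedly finds the first zero with index() and slices the whole chunk off in one step, keeping no pending-route state.
import Mathlib
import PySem

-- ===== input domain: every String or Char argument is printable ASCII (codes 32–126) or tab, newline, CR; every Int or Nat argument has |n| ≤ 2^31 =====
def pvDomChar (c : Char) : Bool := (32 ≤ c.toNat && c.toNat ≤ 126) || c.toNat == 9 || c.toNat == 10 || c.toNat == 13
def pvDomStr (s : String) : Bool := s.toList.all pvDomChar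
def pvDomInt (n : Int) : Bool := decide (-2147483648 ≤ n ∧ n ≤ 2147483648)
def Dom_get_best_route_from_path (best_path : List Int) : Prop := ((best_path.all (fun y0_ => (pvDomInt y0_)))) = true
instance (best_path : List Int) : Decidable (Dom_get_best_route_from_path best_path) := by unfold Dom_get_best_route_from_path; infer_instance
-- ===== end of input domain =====

-- B replaces A's per-element accumulator scan by a find-first-zero-and-slice loop; objective: alternative decomposition (return value proved equal; no mutation observable).

-- ===== PORT A =====
-- A's loop body, step for step: nonzero nodes are appended to the pending route; a zero flushes a nonempty pending route.
def stepA (s : List (List Int) × List Int) (node : Int) : List (List Int) × List Int :=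
  if node ≠ 0 then (s.1, s.2 ++ [node])
  else if s.2 ≠ [] then (s.1 ++ [s.2], ([] : List Int)) else (s.1, ([] : List Int))

def get_best_route_from_path (best_path : List Int) : List (List Int) :=
  if best_path = [] then []
  else (best_path.foldl stepA ([], [])).1

-- ===== PORT B =====
-- termination lemma for the while loop: slicing past the first zero strictly shrinks the list
theorem altLoop_dec (rest : List Int) (i : Nat)
    (h : PySem.List.index? rest 0 = some i) :
    (PySem.List.slice rest (some ((i : Int) + 1)) none).length < rest.length := by
  obtain ⟨pre, suf, hx, hlen, -⟩ := (PySem.List.index?_eq_some_iff _ _ _).1 h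
  have hi : ((i : Int) + 1) = ((i + 1 : Nat) : Int) := by push_cast; ring
  rw [hi, PySem.List.slice_from_natCast]
  subst hx hlen
  simp
  omega

-- B's while loop: 'while 0 in rest: i = rest.index(0); …' — the membership test and
-- rest.index(0) are both rendered by one match on PySem.List.index? (none ↔ 0 ∉ rest).
def altLoop (routes : List (List Int)) (rest : List Int) : List (List Int) :=
  match h : PySem.List.index? rest 0 with
  | none => routes
  | some i =>
      altLoop
        (if 0 < i then routes ++ [PySem.List.slice rest none (some (i : Int))] else routes)
        (PySem.List.slice rest (some ((i : Int) + 1)) none)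
termination_by rest.length
decreasing_by exact altLoop_dec rest i h

def get_best_route_from_path_alt (best_path : List Int) : List (List Int) :=
  altLoop [] best_path

-- ===== PRECONDITION & SPEC =====
def Spec_get_best_route_from_path (best_path : List Int) (out : List (List Int)) : Prop := out = get_best_route_from_path_alt best_path
instance (best_path : List Int) (out : List (List Int)) : Decidable (Spec_get_best_route_from_path best_path out) := by unfold Spec_get_best_route_from_path; infer_instance

-- ===== CLAIM (what is proved, stated in full; the proofs are below) =====
def Claim_equal_get_best_route_from_path : Prop := ∀ (best_path : List Int), Dom_get_best_route_from_path best_path → Spec_get_best_route_from_path best_path (get_best_route_from_path best_path)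

-- ===== LEMMAS AND PROOFS =====

-- folding A's step over a zero-free list only grows the pending route
theorem foldA_nozero (pre : List Int) (rs : List (List Int)) (acc : List Int)
    (h : (0 : Int) ∉ pre) :
    pre.foldl stepA (rs, acc) = (rs, acc ++ pre) := by
  induction pre generalizing acc with
  | nil => simp
  | cons x xs ih =>
      have hx : x ≠ 0 := by rintro rfl; exact h (List.mem_cons_self)
      have hxs : (0 : Int) ∉ xs := fun hm => h (List.mem_cons_of_mem _ hm)
      simp only [List.foldl_cons, stepA, if_pos hx]
      rw [ih _ hxs]
      simp

-- main invariant: A's fold from (rs, []) computes B's while loop from routes = rs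
theorem fold_eq_altLoop (xs : List Int) (rs : List (List Int)) :
    (xs.foldl stepA (rs, [])).1 = altLoop rs xs := by
  induction hn : xs.length using Nat.strong_induction_on generalizing xs rs with
  | _ n ih =>
  cases h : PySem.List.index? xs 0 with
  | none =>
      have h0 : (0 : Int) ∉ xs := (PySem.List.index?_eq_none_iff _ _).1 h
      rw [altLoop, h]; dsimp only; rw [show (List.foldl stepA (rs, ([]:List Int)) xs) = (rs, [] ++ xs) from foldA_nozero xs rs [] h0]
  | some i =>
      obtain ⟨pre, suf, hx, hlen, hpre⟩ := (PySem.List.index?_eq_some_iff _ _ _).1 h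
      have hi1 : ((i : Int) + 1) = ((i + 1 : Nat) : Int) := by push_cast; ring
      have hslice1 : PySem.List.slice xs none (some (i : Int)) = pre := by
        rw [PySem.List.slice_to_natCast, hx, ← hlen, List.take_left]
      have hslice2 : PySem.List.slice xs (some ((i : Int) + 1)) none = suf := by
        rw [hi1, PySem.List.slice_from_natCast, hx, ← hlen]
        have : pre ++ 0 :: suf = (pre ++ [0]) ++ suf := by simp
        rw [this]
        have : pre.length + 1 = (pre ++ [(0 : Int)]).length := by simp
        rw [this, List.drop_left]
      rw [altLoop, h]; dsimp only; rw [hslice1, hslice2]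
      have hx' : xs = (pre ++ [(0 : Int)]) ++ suf := by rw [hx]; simp
      rw [hx', List.foldl_append, List.foldl_append, foldA_nozero pre rs [] hpre]
      have hzero : [(0 : Int)].foldl stepA (rs, ([] : List Int) ++ pre) =
          ((if 0 < i then rs ++ [pre] else rs), ([] : List Int)) := by
        simp only [List.nil_append, List.foldl_cons, List.foldl_nil, stepA]
        subst hlen
        cases pre <;> simp
      rw [hzero]
      have hlt : suf.length < n := by subst hn; rw [hx']; simp; omega
      exact ih suf.length hlt suf _ rfl

theorem get_best_route_from_path_eq (best_path : List Int) :
    get_best_route_from_path best_path = get_best_route_from_path_alt best_path := by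
  unfold get_best_route_from_path get_best_route_from_path_alt
  by_cases h : best_path = []
  · subst h; rw [altLoop]; rfl
  · rw [if_neg h, fold_eq_altLoop]

-- ===== VERDICT (by name: the statement is the Claim_ definition above) =====
theorem get_best_route_from_path_spec : Claim_equal_get_best_route_from_path := by
  intro bp _
  unfold Spec_get_best_route_from_path
  exact get_best_route_from_path_eq bp
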